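-- pv_equiv track=rewrite | github.com/Shenia/daily_byte_exercises | 28_5_take_two.py | take_two
-- ===== SOURCE A (Python) =====
-- def take_two(nums):
--   seen_once = {}
--   ret_array = []
--   for num in nums:
--     if not num in seen_once:
--       seen_once[num] = 1
--     else:
--       ret_array.append(num)
--   return ret_array
-- ===== SOURCE B (Python) =====
-- def take_two(nums):
--   first_idx = {}
--   for i, num in enumerate(nums):
--     if num not in first_idx:
--       first_idx[num] = i
--   return [num for i, num in enumerate(nums) if first_idx[num] != i]
-- ===== Notes on version B (the rewrite author's own statement) =====
-- stated objective: alternative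
-- what changed: Replaces A's single interleaved pass (mutating a seen-dict while appending duplicates) by two independent passes: first build a complete first-occurrence index table, then filter out each element standing at its own first-occurrence position.
import Mathlib
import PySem

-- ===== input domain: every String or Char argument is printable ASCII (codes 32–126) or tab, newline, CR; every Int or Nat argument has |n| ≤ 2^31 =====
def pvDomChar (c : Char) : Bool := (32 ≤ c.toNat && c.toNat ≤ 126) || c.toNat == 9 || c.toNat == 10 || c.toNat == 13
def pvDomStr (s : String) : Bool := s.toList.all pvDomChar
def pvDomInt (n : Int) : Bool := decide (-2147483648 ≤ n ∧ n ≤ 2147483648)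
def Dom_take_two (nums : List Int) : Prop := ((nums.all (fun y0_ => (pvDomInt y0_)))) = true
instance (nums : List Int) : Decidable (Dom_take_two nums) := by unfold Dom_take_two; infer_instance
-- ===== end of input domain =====

-- B replaces A's single interleaved pass by two passes: build a first-occurrence
-- index table, then filter out elements at their first-occurrence position (alternative decomposition, same cost).

-- ===== PORT A =====
-- one pass: dict of seen values; append num to result once it was seen before
def take_two (nums : List Int) : List Int :=
  (nums.foldl
    (fun (st : PySem.Dict Int Int × List Int) num =>
      if st.1.contains num = false then (st.1.insert num 1, st.2)
      else (st.1, st.2 ++ [num]))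
    (PySem.Dict.empty, [])).2

-- ===== PORT B =====
-- pass 1: first_idx[num] = index of num's first occurrence (set only if absent);
-- pass 2: keep num whenever its position is not its first-occurrence position.
-- (first_idx[num] in Python always succeeds here, so get? is compared against some i.)
def take_two_alt (nums : List Int) : List Int :=
  let first_idx : PySem.Dict Int Int :=
    (PySem.List.enumerate nums 0).foldl
      (fun d p => if d.contains p.2 = false then d.insert p.2 p.1 else d)
      PySem.Dict.empty
  ((PySem.List.enumerate nums 0).filter
      (fun p => decide (first_idx.get? p.2 ≠ some p.1))).map (·.2)

-- ===== PRECONDITION & SPEC =====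
def Spec_take_two (nums : List Int) (out : List Int) : Prop := out = take_two_alt nums
instance (nums : List Int) (out : List Int) : Decidable (Spec_take_two nums out) := by unfold Spec_take_two; infer_instance

-- ===== CLAIM (what is proved, stated in full; the proofs are below) =====
def Claim_equal_take_two : Prop := ∀ (nums : List Int), Dom_take_two nums → Spec_take_two nums (take_two nums)

-- ===== LEMMAS AND PROOFS =====

-- reference: scan with an explicit prefix of already-seen values
def pvGo : List Int → List Int → List Int
  | [], _ => []
  | x :: xs, pre => if x ∈ pre then x :: pvGo xs (pre ++ [x]) else pvGo xs (pre ++ [x])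

-- A's fold equals the reference, for any dict whose keys are exactly the prefix's members
theorem pvA_gen (l : List Int) (d : PySem.Dict Int Int) (ret pre : List Int)
    (hm : ∀ v : Int, d.contains v = true ↔ v ∈ pre) :
    (l.foldl
      (fun (st : PySem.Dict Int Int × List Int) num =>
        if st.1.contains num = false then (st.1.insert num 1, st.2)
        else (st.1, st.2 ++ [num]))
      (d, ret)).2 = ret ++ pvGo l pre := by
  induction l generalizing d ret pre with
  | nil => simp [pvGo]
  | cons x xs ih =>
    by_cases hx : x ∈ pre
    · have hc : d.contains x = true := (hm x).mpr hx
      simp only [List.foldl_cons, hc, pvGo, if_pos hx]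
      rw [if_neg (by simp)]
      rw [ih d (ret ++ [x]) (pre ++ [x]) (fun v => by
        rw [hm v]; simp only [List.mem_append, List.mem_singleton]
        constructor
        · exact Or.inl
        · rintro (h | rfl); exacts [h, hx])]
      simp
    · have hc : d.contains x = false := by
        cases h : d.contains x with
        | false => rfl
        | true => exact absurd ((hm x).mp h) hx
      simp only [List.foldl_cons, hc, pvGo, if_neg hx]
      exact ih (d.insert x 1) ret (pre ++ [x]) (fun v => by
        rw [PySem.Dict.contains_insert]
        simp only [Bool.or_eq_true, beq_iff_eq, hm v, List.mem_append, List.mem_singleton]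
        tauto)

-- the first-index fold: lookup is the stored value, else the first matching index in the rest
theorem pvFI_get (l : List Int) (s : Int) (d : PySem.Dict Int Int) (v : Int) :
    ((PySem.List.enumerate l s).foldl
      (fun d p => if d.contains p.2 = false then d.insert p.2 p.1 else d) d).get? v
    = (d.get? v).or
        ((((PySem.List.enumerate l s).find? (fun p => p.2 == v)).map (·.1))) := by
  induction l generalizing s d with
  | nil => simp [PySem.List.enumerate_nil]
  | cons x xs ih =>
    rw [PySem.List.enumerate_cons]
    simp only [List.foldl_cons]
    by_cases hxv : x = v
    · subst hxv
      rw [List.find?_cons_of_pos (by simp)]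
      cases hc : d.contains x with
      | true =>
        rw [if_neg (by simp), ih]
        have hs : (d.get? x).isSome := by
          rw [← PySem.Dict.contains_eq_isSome_get?, hc]
        obtain ⟨j, hj⟩ := Option.isSome_iff_exists.mp hs
        simp [hj]
      | false =>
        rw [if_pos rfl, ih]
        have hn : d.get? x = none := by
          cases h : d.get? x with
          | none => rfl
          | some j =>
            exfalso
            have := PySem.Dict.contains_eq_isSome_get? (d := d) (k := x)
            rw [h] at this; rw [hc] at this; simp at this
        simp [PySem.Dict.get?_insert_self, hn]
    · rw [List.find?_cons_of_neg (by simp; exact hxv)]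
      cases hc : d.contains x with
      | true => rw [if_neg (by simp), ih]
      | false =>
        rw [if_pos rfl, ih]
        rw [PySem.Dict.get?_insert_of_ne d s (Ne.symm hxv)]

-- B's filtering pass equals the reference, under the first-index invariants
theorem pvB_gen (fi : PySem.Dict Int Int) (l : List Int) (s : Int) (pre : List Int)
    (h1 : ∀ x : Int, x ∈ pre → ∃ j, fi.get? x = some j ∧ j < s)
    (h2 : ∀ x : Int, x ∉ pre →
      fi.get? x = (((PySem.List.enumerate l s).find? (fun p => p.2 == x)).map (·.1))) :
    ((PySem.List.enumerate l s).filter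
        (fun p => decide (fi.get? p.2 ≠ some p.1))).map (·.2) = pvGo l pre := by
  induction l generalizing s pre with
  | nil => simp [PySem.List.enumerate_nil, pvGo]
  | cons x xs ih =>
    rw [PySem.List.enumerate_cons]
    by_cases hx : x ∈ pre
    · obtain ⟨j, hj, hjs⟩ := h1 x hx
      have hne : fi.get? x ≠ some s := by rw [hj]; simp; omega
      simp only [List.filter_cons, pvGo, if_pos hx]
      rw [if_pos (by simpa using hne)]
      simp only [List.map_cons]
      congr 1
      refine ih (s + 1) (pre ++ [x]) ?_ ?_
      · intro y hy
        rcases List.mem_append.mp hy with hy | hy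
        · obtain ⟨k, hk, hks⟩ := h1 y hy; exact ⟨k, hk, by omega⟩
        · simp at hy; subst hy; exact ⟨j, hj, by omega⟩
      · intro y hy
        have hyp : y ∉ pre := fun h => hy (List.mem_append.mpr (Or.inl h))
        have hyx : y ≠ x := fun h => hy (by simp [h])
        have := h2 y hyp
        rwa [PySem.List.enumerate_cons,
          List.find?_cons_of_neg (by simp; exact fun h => hyx h.symm)] at this
    · have hfx : fi.get? x = some s := by
        rw [h2 x hx, PySem.List.enumerate_cons, List.find?_cons]
        simp
      simp only [List.filter_cons, pvGo, if_neg hx]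
      rw [if_neg (by simp [hfx])]
      refine ih (s + 1) (pre ++ [x]) ?_ ?_
      · intro y hy
        rcases List.mem_append.mp hy with hy | hy
        · obtain ⟨k, hk, hks⟩ := h1 y hy; exact ⟨k, hk, by omega⟩
        · simp at hy; subst hy; exact ⟨s, hfx, by omega⟩
      · intro y hy
        have hyp : y ∉ pre := fun h => hy (List.mem_append.mpr (Or.inl h))
        have hyx : y ≠ x := fun h => hy (by simp [h])
        have := h2 y hyp
        rwa [PySem.List.enumerate_cons,
          List.find?_cons_of_neg (by simp; exact fun h => hyx h.symm)] at this

-- ===== VERDICT (by name: the statement is the Claim_ definition above) =====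
theorem take_two_spec : Claim_equal_take_two := by
  intro nums _
  unfold Spec_take_two take_two take_two_alt
  rw [pvA_gen nums PySem.Dict.empty [] [] (fun v => by simp [PySem.Dict.contains_empty])]
  rw [pvB_gen _ nums 0 [] (fun x hx => absurd hx (List.not_mem_nil))
    (fun x _ => by rw [pvFI_get]; simp [PySem.Dict.get?_empty])]
  simp
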